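-- pv_equiv track=rewrite | github.com/junoback/MinerU | demo/make_searched_gallery.py | sanitize_caption_for_search
-- ===== SOURCE A (Python) =====
-- def sanitize_caption_for_search(captions):
--     """
--     將 captions (list of lines) 處理：
--     在搜尋前，忽略 {From: ... Page: xx} 前的來源資訊，只保留 Page: 之後的內容。
--     如果沒找到 Page: 行，則不截斷。
--     """
--     page_line_found = False
--     search_lines = []
--
--     for line in captions:
--         if "Page:" in line:
--             page_line_found = True
--             continue
--         if page_line_found:
--             search_lines.append(line)
--
--     if not page_line_found:
--         # 沒有 Page: 行，保留全部
--         search_lines = captions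
--
--     caption_text_for_search = ' '.join(search_lines)
--     return caption_text_for_search
-- ===== SOURCE B (Python) =====
-- def sanitize_caption_for_search(captions):
--     idx = next((i for i, line in enumerate(captions) if "Page:" in line), None)
--     if idx is None:
--         return ' '.join(captions)
--     tail = captions[idx + 1:]
--     return ' '.join(line for line in tail if "Page:" not in line)
-- ===== Notes on version B (the rewrite author's own statement) =====
-- stated objective: alternative
-- what changed: Replaces the flag-carrying single pass with a locate-the-first-'Page:'-marker step followed by slicing the tail and filtering out remaining marker lines.
import Mathlib
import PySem

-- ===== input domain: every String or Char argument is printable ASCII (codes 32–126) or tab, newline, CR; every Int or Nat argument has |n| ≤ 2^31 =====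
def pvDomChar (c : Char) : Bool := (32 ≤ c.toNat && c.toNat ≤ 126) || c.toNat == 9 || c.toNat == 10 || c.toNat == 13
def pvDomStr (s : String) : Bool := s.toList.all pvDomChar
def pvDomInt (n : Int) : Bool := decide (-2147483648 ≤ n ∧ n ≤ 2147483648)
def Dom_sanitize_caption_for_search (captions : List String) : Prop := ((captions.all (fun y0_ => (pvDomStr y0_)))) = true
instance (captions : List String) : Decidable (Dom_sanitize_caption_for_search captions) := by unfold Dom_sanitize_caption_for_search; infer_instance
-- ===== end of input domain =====

-- B replaces A's flag-carrying single pass by find-the-marker-index, then slice the tail and filter remaining marker lines (alternative decomposition, same cost).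

-- ===== PORT A =====
-- flag-carrying loop: state = (page_line_found, search_lines)
def sanitize_caption_for_search (captions : List String) : String :=
  let st := captions.foldl
    (fun (st : Bool × List String) line =>
      if PySem.Str.isIn "Page:" line then (true, st.2)
      else if st.1 then (st.1, st.2 ++ [line]) else st)
    (false, [])
  let search_lines := if st.1 then st.2 else captions
  PySem.Str.join " " search_lines

-- ===== PORT B =====
def sanitize_caption_for_search_alt (captions : List String) : String :=
  match captions.findIdx? (fun line => PySem.Str.isIn "Page:" line) with
  | none => PySem.Str.join " " captions
  | some i =>
    let tail := captions.drop (i + 1)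
    PySem.Str.join " " (tail.filter (fun line => !PySem.Str.isIn "Page:" line))

-- ===== PRECONDITION & SPEC =====
def Spec_sanitize_caption_for_search (captions : List String) (out : String) : Prop := out = sanitize_caption_for_search_alt captions
instance (captions : List String) (out : String) : Decidable (Spec_sanitize_caption_for_search captions out) := by unfold Spec_sanitize_caption_for_search; infer_instance

-- ===== CLAIM (what is proved, stated in full; the proofs are below) =====
def Claim_equal_sanitize_caption_for_search : Prop := ∀ (captions : List String), Dom_sanitize_caption_for_search captions → Spec_sanitize_caption_for_search captions (sanitize_caption_for_search captions)

-- ===== LEMMAS AND PROOFS =====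

-- once the flag is true, A's loop just appends the non-marker lines
theorem pv_loopA_true (l : List String) (acc : List String) :
    l.foldl
      (fun (st : Bool × List String) line =>
        if PySem.Str.isIn "Page:" line then (true, st.2)
        else if st.1 then (st.1, st.2 ++ [line]) else st)
      (true, acc)
    = (true, acc ++ l.filter (fun line => !PySem.Str.isIn "Page:" line)) := by
  induction l generalizing acc with
  | nil => simp
  | cons h t ih =>
    by_cases hp : PySem.Str.isIn "Page:" h = true <;>
      simp only [List.foldl_cons, List.filter_cons, hp, Bool.not_true, Bool.not_false,
        Bool.false_eq_true, if_true, if_false, ite_true, ite_false, ih, List.append_assoc,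
        List.singleton_append]

-- A's loop from the initial state, characterised by the first marker index
theorem pv_loopA (l : List String) :
    l.foldl
      (fun (st : Bool × List String) line =>
        if PySem.Str.isIn "Page:" line then (true, st.2)
        else if st.1 then (st.1, st.2 ++ [line]) else st)
      (false, [])
    = match l.findIdx? (fun line => PySem.Str.isIn "Page:" line) with
      | none => (false, [])
      | some i => (true, (l.drop (i + 1)).filter (fun line => !PySem.Str.isIn "Page:" line)) := by
  induction l with
  | nil => simp
  | cons h t ih =>
    by_cases hp : PySem.Str.isIn "Page:" h = true
    · simp only [List.foldl_cons, List.findIdx?_cons, hp, if_true, ite_true, pv_loopA_true,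
        List.nil_append, List.drop_succ_cons, List.drop_zero]
    · simp only [List.foldl_cons, List.findIdx?_cons, hp, Bool.false_eq_true, if_false,
        ite_false, ih]
      cases hfi : t.findIdx? (fun line => PySem.Str.isIn "Page:" line) with
      | none => simp [hfi]
      | some i => simp [hfi, List.drop_succ_cons]

-- ===== VERDICT (by name: the statement is the Claim_ definition above) =====
theorem sanitize_caption_for_search_spec : Claim_equal_sanitize_caption_for_search := by
  intro captions _
  unfold Spec_sanitize_caption_for_search sanitize_caption_for_search sanitize_caption_for_search_alt
  rw [pv_loopA]
  cases hfi : captions.findIdx? (fun line => PySem.Str.isIn "Page:" line) <;> simp [hfi]
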